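-- pv_equiv track=rewrite | github.com/Real-Fruit-Snacks/Deluge | deluge/core/utils.py | validate_nmap_args
-- ===== SOURCE A (Python) =====
-- from typing import List, Tuple
--
-- def validate_nmap_args(args: List[str]) -> Tuple[bool, List[str]]:
--     """
--     Validate Nmap arguments for common typos and conflicting combinations.
--
--     Checks for:
--     - Duplicate -p flags
--     - Conflicting scan types (e.g., -sS and -sT)
--     - Invalid port ranges
--
--     Args:
--         args: A list of Nmap command-line arguments.
--
--     Returns:
--         A tuple containing (is_valid, list_of_warnings).
--     """
--     warnings = []
--     is_valid = True
--
--     # Check for duplicate -p flags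
--     p_count = sum(1 for arg in args if arg == "-p")
--     if p_count > 1:
--         warnings.append("Duplicate '-p' flags detected. Nmap will use the last one.")
--
--     # Check for conflicting scan types
--     if "-sS" in args and "-sT" in args:
--         warnings.append(
--             "Conflicting scan types: '-sS' (TCP SYN) and '-sT' (TCP Connect) cannot be used together."
--         )
--         is_valid = False
--
--     # Check for invalid port ranges
--     for i, arg in enumerate(args):
--         if arg == "-p" and i + 1 < len(args):
--             port_val = args[i + 1]
--             # Basic check for port range format (e.g., 1-65535 or comma separated)
--             # This is a simplified check
--             if "-" in port_val:
--                 try: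
--                     parts = port_val.split("-")
--                     if len(parts) == 2:
--                         start = int(parts[0])
--                         end = int(parts[1])
--                         if start < 0 or end > 65535 or start > end:
--                             warnings.append(f"Invalid port range: {port_val}")
--                             is_valid = False
--                 except ValueError:
--                     warnings.append(f"Malformed port range: {port_val}")
--                     is_valid = False
--
--     return is_valid, warnings
-- ===== SOURCE B (Python) =====
-- from typing import List, Tuple
--
-- def validate_nmap_args(args: List[str]) -> Tuple[bool, List[str]]:
--     """Single-pass variant: one loop gathers the -p count, the scan-type flags
--     and the port-range warnings; the result is assembled afterwards."""
--     p_count = 0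
--     saw_sS = False
--     saw_sT = False
--     port_warnings = []
--     for i, arg in enumerate(args):
--         if arg == "-p":
--             p_count += 1
--             if i + 1 < len(args):
--                 pv = args[i + 1]
--                 if "-" in pv:
--                     parts = pv.split("-")
--                     if len(parts) == 2:
--                         try:
--                             start = int(parts[0])
--                             end = int(parts[1])
--                             if start < 0 or end > 65535 or start > end:
--                                 port_warnings.append(f"Invalid port range: {pv}")
--                         except ValueError:
--                             port_warnings.append(f"Malformed port range: {pv}")
--         elif arg == "-sS":
--             saw_sS = True
--         elif arg == "-sT":
--             saw_sT = True
--     warnings = []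
--     if p_count > 1:
--         warnings.append("Duplicate '-p' flags detected. Nmap will use the last one.")
--     conflict = saw_sS and saw_sT
--     if conflict:
--         warnings.append(
--             "Conflicting scan types: '-sS' (TCP SYN) and '-sT' (TCP Connect) cannot be used together."
--         )
--     warnings.extend(port_warnings)
--     is_valid = not conflict and not port_warnings
--     return is_valid, warnings
-- ===== Notes on version B (the rewrite author's own statement) =====
-- stated objective: alternative
-- what changed: Fuses A's three separate scans (p-flag count, two membership tests, enumerate loop) into one pass that accumulates the count, both scan-type flags and the port-range warnings, then assembles the result afterwards.
import Mathlib
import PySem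

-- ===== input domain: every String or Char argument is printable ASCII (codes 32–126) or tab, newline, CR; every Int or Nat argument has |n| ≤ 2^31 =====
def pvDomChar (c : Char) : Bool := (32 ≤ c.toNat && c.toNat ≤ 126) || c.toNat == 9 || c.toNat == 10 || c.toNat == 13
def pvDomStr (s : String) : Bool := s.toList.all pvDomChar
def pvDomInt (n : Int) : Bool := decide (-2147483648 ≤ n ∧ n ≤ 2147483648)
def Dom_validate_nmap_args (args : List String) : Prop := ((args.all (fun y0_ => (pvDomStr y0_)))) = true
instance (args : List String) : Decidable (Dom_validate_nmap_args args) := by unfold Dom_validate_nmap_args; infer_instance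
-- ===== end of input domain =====

-- B fuses A's three scans into one accumulating pass and assembles the result afterwards (alternative decomposition, same cost).

-- ===== PORT A =====
-- loop body of A's `for i, arg in enumerate(args)` loop, threading (is_valid, warnings)
def pvStepA (args : List String) (st : Bool × List String) (p : Int × String) : Bool × List String :=
  if p.2 == "-p" && decide (p.1 + 1 < (args.length : Int)) then
    match PySem.List.pyGet? args (p.1 + 1) with
    | none => st
    | some port_val =>
      if PySem.Str.isIn "-" port_val then
        match PySem.Str.split? port_val "-" with
        | some [p0, p1] =>
          match PySem.Int.ofStr? p0, PySem.Int.ofStr? p1 with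
          | some s, some e =>
            if s < 0 || e > 65535 || s > e then
              (false, st.2 ++ ["Invalid port range: " ++ port_val])
            else st
          | _, _ => (false, st.2 ++ ["Malformed port range: " ++ port_val])
        | _ => st
      else st
  else st

def validate_nmap_args (args : List String) : Bool × List String :=
  let warnings : List String := []
  let is_valid : Bool := true
  let p_count : Int := args.foldl (fun acc arg => if arg == "-p" then acc + 1 else acc) 0
  let warnings :=
    if p_count > 1 then warnings ++ ["Duplicate '-p' flags detected. Nmap will use the last one."]
    else warnings
  let res :=
    if args.contains "-sS" && args.contains "-sT" then
      (false, warnings ++ ["Conflicting scan types: '-sS' (TCP SYN) and '-sT' (TCP Connect) cannot be used together."])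
    else (is_valid, warnings)
  (PySem.List.enumerate args 0).foldl (pvStepA args) res

-- ===== PORT B =====
-- loop body of B's single pass, threading (p_count, saw_sS, saw_sT, port_warnings)
def pvStepB (args : List String) (st : Int × Bool × Bool × List String) (p : Int × String) :
    Int × Bool × Bool × List String :=
  let (p_count, saw_sS, saw_sT, pw) := st
  if p.2 == "-p" then
    let p_count := p_count + 1
    if decide (p.1 + 1 < (args.length : Int)) then
      match PySem.List.pyGet? args (p.1 + 1) with
      | none => (p_count, saw_sS, saw_sT, pw)
      | some pv =>
        if PySem.Str.isIn "-" pv then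
          match PySem.Str.split? pv "-" with
          | some [p0, p1] =>
            match PySem.Int.ofStr? p0, PySem.Int.ofStr? p1 with
            | some s, some e =>
              if s < 0 || e > 65535 || s > e then
                (p_count, saw_sS, saw_sT, pw ++ ["Invalid port range: " ++ pv])
              else (p_count, saw_sS, saw_sT, pw)
            | _, _ => (p_count, saw_sS, saw_sT, pw ++ ["Malformed port range: " ++ pv])
          | _ => (p_count, saw_sS, saw_sT, pw)
        else (p_count, saw_sS, saw_sT, pw)
    else (p_count, saw_sS, saw_sT, pw)
  else if p.2 == "-sS" then (p_count, true, saw_sT, pw)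
  else if p.2 == "-sT" then (p_count, saw_sS, true, pw)
  else (p_count, saw_sS, saw_sT, pw)

def validate_nmap_args_alt (args : List String) : Bool × List String :=
  let st := (PySem.List.enumerate args 0).foldl (pvStepB args) (0, false, false, [])
  let (p_count, saw_sS, saw_sT, pw) := st
  let conflict := saw_sS && saw_sT
  let warnings :=
    (if p_count > 1 then ["Duplicate '-p' flags detected. Nmap will use the last one."] else []) ++
    (if conflict then ["Conflicting scan types: '-sS' (TCP SYN) and '-sT' (TCP Connect) cannot be used together."] else []) ++
    pw
  (!conflict && pw.isEmpty, warnings)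

-- ===== PRECONDITION & SPEC =====
def Spec_validate_nmap_args (args : List String) (out : Bool × List String) : Prop := out = validate_nmap_args_alt args
instance (args : List String) (out : Bool × List String) : Decidable (Spec_validate_nmap_args args out) := by unfold Spec_validate_nmap_args; infer_instance

-- ===== CLAIM (what is proved, stated in full; the proofs are below) =====
def Claim_equal_validate_nmap_args : Prop := ∀ (args : List String), Dom_validate_nmap_args args → Spec_validate_nmap_args args (validate_nmap_args args)

-- ===== LEMMAS AND PROOFS =====

-- the warning (if any) contributed at one index, common characterisation of both loop bodies
def pvCheck (args : List String) (p : Int × String) : List String :=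
  if p.2 == "-p" && decide (p.1 + 1 < (args.length : Int)) then
    match PySem.List.pyGet? args (p.1 + 1) with
    | none => []
    | some pv =>
      if PySem.Str.isIn "-" pv then
        match PySem.Str.split? pv "-" with
        | some [p0, p1] =>
          match PySem.Int.ofStr? p0, PySem.Int.ofStr? p1 with
          | some s, some e =>
            if s < 0 || e > 65535 || s > e then ["Invalid port range: " ++ pv] else []
          | _, _ => ["Malformed port range: " ++ pv]
        | _ => []
      else []
  else []

theorem pvIsEmpty_append {α : Type} (a b : List α) : (a ++ b).isEmpty = (a.isEmpty && b.isEmpty) := by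
  cases a <;> simp

theorem pvCheck_inner (args : List String) (p : Int × String) (v : Bool) (w : List String)
    (h0 : (p.2 == "-p" && decide (p.1 + 1 < (args.length : Int))) = true) :
    pvStepA args (v, w) p = (v && (pvCheck args p).isEmpty, w ++ pvCheck args p) := by
  unfold pvStepA pvCheck
  rw [if_pos h0, if_pos h0]
  cases hg : PySem.List.pyGet? args (p.1 + 1) with
  | none => simp
  | some pv =>
    simp only []
    by_cases hin : PySem.Str.isIn "-" pv = true
    · rw [if_pos hin, if_pos hin]
      rcases hs : PySem.Str.split? pv "-" with _ | parts
      · simp [hs]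
      · rcases parts with _ | ⟨p0, _ | ⟨p1, _ | ⟨q, qs⟩⟩⟩ <;> simp only [hs] <;> try simp
        rcases h1 : PySem.Int.ofStr? p0 with _ | sv <;> rcases h2 : PySem.Int.ofStr? p1 with _ | ev <;>
          simp only [h1, h2] <;> try simp
        split_ifs <;> simp
    · rw [if_neg hin, if_neg hin]; simp

theorem pvStepA_eq (args : List String) (st : Bool × List String) (p : Int × String) :
    pvStepA args st p = (st.1 && (pvCheck args p).isEmpty, st.2 ++ pvCheck args p) := by
  obtain ⟨v, w⟩ := st
  by_cases h0 : (p.2 == "-p" && decide (p.1 + 1 < (args.length : Int))) = true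
  · exact pvCheck_inner args p v w h0
  · unfold pvStepA pvCheck
    rw [if_neg h0, if_neg h0]; simp

theorem pvStepB_eq (args : List String) (st : Int × Bool × Bool × List String) (p : Int × String) :
    pvStepB args st p = (st.1 + (if p.2 == "-p" then 1 else 0),
      st.2.1 || (p.2 == "-sS"), st.2.2.1 || (p.2 == "-sT"), st.2.2.2 ++ pvCheck args p) := by
  obtain ⟨c, s, t, w⟩ := st
  by_cases hp : p.2 = "-p"
  · have h1 : (p.2 == "-p") = true := by simpa using hp
    have h2 : (p.2 == "-sS") = false := by rw [hp]; decide
    have h3 : (p.2 == "-sT") = false := by rw [hp]; decide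
    unfold pvStepB pvCheck
    simp only [h1, h2, h3, Bool.true_and, if_true, Bool.or_false]
    by_cases hb : decide (p.1 + 1 < (args.length : Int)) = true
    · rw [if_pos hb, if_pos hb]
      cases hg : PySem.List.pyGet? args (p.1 + 1) with
      | none => simp
      | some pv =>
        simp only []
        by_cases hin : PySem.Str.isIn "-" pv = true
        · rw [if_pos hin, if_pos hin]
          rcases hs : PySem.Str.split? pv "-" with _ | parts
          · simp [hs]
          · rcases parts with _ | ⟨p0, _ | ⟨p1, _ | ⟨q, qs⟩⟩⟩ <;> simp only [hs] <;> try simp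
            rcases ha : PySem.Int.ofStr? p0 with _ | sv <;> rcases hb2 : PySem.Int.ofStr? p1 with _ | ev <;>
              simp only [ha, hb2] <;> try simp
            split_ifs <;> simp
        · rw [if_neg hin, if_neg hin]; simp
    · rw [if_neg hb, if_neg hb]; simp
  · have h1 : (p.2 == "-p") = false := by simpa using hp
    unfold pvStepB pvCheck
    simp only [h1, Bool.false_and, if_false, Bool.ite_eq_false_distrib, List.append_nil, add_zero]
    by_cases hs : p.2 = "-sS"
    · have h2 : (p.2 == "-sS") = true := by simpa using hs
      have h3 : (p.2 == "-sT") = false := by rw [hs]; decide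
      simp [h2, h3]
    · have h2 : (p.2 == "-sS") = false := by simpa using hs
      by_cases ht : p.2 = "-sT"
      · have h3 : (p.2 == "-sT") = true := by simpa using ht
        simp [h2, h3]
      · have h3 : (p.2 == "-sT") = false := by simpa using ht
        simp [h2, h3]

theorem foldA_eq (args : List String) (l : List (Int × String)) (st : Bool × List String) :
    l.foldl (pvStepA args) st =
      (st.1 && (l.flatMap (pvCheck args)).isEmpty, st.2 ++ l.flatMap (pvCheck args)) := by
  induction l generalizing st with
  | nil => simp
  | cons p l ih =>
    simp only [List.foldl_cons, pvStepA_eq, ih, List.flatMap_cons]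
    simp [pvIsEmpty_append, Bool.and_assoc, List.append_assoc]

theorem foldB_eq (args : List String) (l : List (Int × String)) (st : Int × Bool × Bool × List String) :
    l.foldl (pvStepB args) st =
      (st.1 + ((l.map Prod.snd).count "-p" : Int),
       st.2.1 || (l.map Prod.snd).contains "-sS",
       st.2.2.1 || (l.map Prod.snd).contains "-sT",
       st.2.2.2 ++ l.flatMap (pvCheck args)) := by
  induction l generalizing st with
  | nil => simp
  | cons p l ih =>
    simp only [List.foldl_cons, pvStepB_eq, ih, List.map_cons, List.flatMap_cons]
    obtain ⟨c, s, t, w⟩ := st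
    simp only [Prod.mk.injEq]
    refine ⟨?_, ?_, ?_, ?_⟩
    · by_cases h : (p.2 == "-p") = true <;>
        simp [List.count_cons, h, Bool.beq_comm] <;> push_cast <;> ring
    · rw [List.contains_cons, Bool.beq_comm]
      simp [Bool.or_assoc]
    · rw [List.contains_cons, Bool.beq_comm]
      simp [Bool.or_assoc]
    · simp [List.append_assoc]

-- ===== VERDICT (by name: the statement is the Claim_ definition above) =====
theorem validate_nmap_args_spec : Claim_equal_validate_nmap_args := by
  intro args _
  unfold Spec_validate_nmap_args validate_nmap_args validate_nmap_args_alt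
  simp only [foldA_eq, foldB_eq, PySem.List.map_snd_enumerate, PySem.List.foldl_beq_add_one,
    zero_add, List.nil_append]
  split_ifs <;> simp_all [List.append_assoc] <;> tauto
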